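-- pv_equiv track=rewrite | github.com/gulfstoore/toolfaec | saed.py | joined
-- ===== SOURCE A (Python) =====
-- def joined(uid):
--     """Determine account creation year based on UID."""
--     if len(uid) == 15:
--         prefixes = {
--             '1000000': '2009', '1000001': '2009', '1000002': '2009',
--             '1000003': '2009', '1000004': '2009', '1000005': '2009',
--             '1000006': '2010', '1000007': '2010', '1000008': '2010',
--             '1000009': '2010', '100001': '2010/2011', '100002': '2011/2012',
--             '100003': '2011/2012', '100004': '2012/2013', '100005': '2013/2014',
--             '100006': '2013/2014', '100007': '2014/2015', '100008': '2014/2015',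
--             '100009': '2015', '10001': '2015/2016', '10002': '2016/2017',
--             '10003': '2018/2019', '10004': '2019/2020', '10005': '2020',
--             '10006': '2021', '10007': '2021', '10008': '2022', '10009': '2023'
--         }
--         for prefix, year in prefixes.items():
--             if uid.startswith(prefix):
--                 return year
--     elif len(uid) in [9, 10]:
--         return '2008/2009'
--     elif len(uid) == 8:
--         return '2007/2008'
--     elif len(uid) == 7:
--         return '2006/2007'
--     return ''
-- ===== SOURCE B (Python) =====
-- _Y7 = ['2009', '2009', '2009', '2009', '2009', '2009',
--        '2010', '2010', '2010', '2010']
-- _Y6 = ['2010/2011', '2011/2012', '2011/2012', '2012/2013', '2013/2014',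
--        '2013/2014', '2014/2015', '2014/2015', '2015']
-- _Y5 = ['2015/2016', '2016/2017', '2018/2019', '2019/2020', '2020',
--        '2021', '2021', '2022', '2023']
-- _TAIL = {9: '2008/2009', 10: '2008/2009', 8: '2007/2008', 7: '2006/2007'}
--
--
-- def joined(uid):
--     """Determine account creation year based on UID."""
--     n = len(uid)
--     if n != 15:
--         return _TAIL.get(n, '')
--     # Decision tree on the digits after the common '1000' stem:
--     # the first nonzero position (4, 5 or 6) picks the table, its digit the entry.
--     if not uid.startswith('1000'):
--         return ''
--     c4, c5, c6 = uid[4], uid[5], uid[6]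
--     if c4 != '0':
--         return _Y5[ord(c4) - 49] if '1' <= c4 <= '9' else ''
--     if c5 != '0':
--         return _Y6[ord(c5) - 49] if '1' <= c5 <= '9' else ''
--     return _Y7[ord(c6) - 48] if '0' <= c6 <= '9' else ''
-- ===== Notes on version B (the rewrite author's own statement) =====
-- stated objective: alternative
-- what changed: Replaces the ordered startswith scan over a 28-entry prefix dict with a decision tree: after checking the four-character stem common to all prefixes, the first nonzero digit position (4, 5 or 6) selects one of three small year lists indexed directly by that digit.
import Mathlib
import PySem

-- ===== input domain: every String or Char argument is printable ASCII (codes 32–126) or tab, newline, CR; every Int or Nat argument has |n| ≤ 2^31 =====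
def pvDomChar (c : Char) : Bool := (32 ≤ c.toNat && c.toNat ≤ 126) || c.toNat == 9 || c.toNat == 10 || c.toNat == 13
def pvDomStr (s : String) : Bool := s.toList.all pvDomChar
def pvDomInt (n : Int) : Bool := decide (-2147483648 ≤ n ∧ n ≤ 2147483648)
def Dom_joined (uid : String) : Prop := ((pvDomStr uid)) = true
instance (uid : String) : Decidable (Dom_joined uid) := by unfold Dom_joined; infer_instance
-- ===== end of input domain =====

-- B replaces A's ordered startswith scan over the 28-entry prefix dict with a
-- decision tree: after the common four-character stem, the first nonzero digit
-- position (4, 5 or 6) selects one of three small year lists indexed by that digit.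

-- ===== PORT A =====
-- the dict literal from A, in insertion order
def pvPrefixTable : List (String × String) :=
  [("1000000", "2009"), ("1000001", "2009"), ("1000002", "2009"),
   ("1000003", "2009"), ("1000004", "2009"), ("1000005", "2009"),
   ("1000006", "2010"), ("1000007", "2010"), ("1000008", "2010"),
   ("1000009", "2010"), ("100001", "2010/2011"), ("100002", "2011/2012"),
   ("100003", "2011/2012"), ("100004", "2012/2013"), ("100005", "2013/2014"),
   ("100006", "2013/2014"), ("100007", "2014/2015"), ("100008", "2014/2015"),
   ("100009", "2015"), ("10001", "2015/2016"), ("10002", "2016/2017"),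
   ("10003", "2018/2019"), ("10004", "2019/2020"), ("10005", "2020"),
   ("10006", "2021"), ("10007", "2021"), ("10008", "2022"), ("10009", "2023")]

def joined (uid : String) : String :=
  if PySem.Str.len uid = 15 then
    -- the for-loop with early return: first item whose prefix startswith-matches
    match pvPrefixTable.find? (fun pr => PySem.Str.startswith uid pr.1) with
    | some pr => pr.2
    | none => ""
  else if PySem.Str.len uid = 9 ∨ PySem.Str.len uid = 10 then "2008/2009"
  else if PySem.Str.len uid = 8 then "2007/2008"
  else if PySem.Str.len uid = 7 then "2006/2007"
  else ""

-- ===== PORT B =====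
def pvY7 : List String :=
  ["2009", "2009", "2009", "2009", "2009", "2009",
   "2010", "2010", "2010", "2010"]
def pvY6 : List String :=
  ["2010/2011", "2011/2012", "2011/2012", "2012/2013", "2013/2014",
   "2013/2014", "2014/2015", "2014/2015", "2015"]
def pvY5 : List String :=
  ["2015/2016", "2016/2017", "2018/2019", "2019/2020", "2020",
   "2021", "2021", "2022", "2023"]
def pvTail : PySem.Dict Int String :=
  PySem.Dict.mk [(9, "2008/2009"), (10, "2008/2009"), (8, "2007/2008"), (7, "2006/2007")]

def joined_alt (uid : String) : String :=
  let n := PySem.Str.len uid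
  if n ≠ 15 then pvTail.getD n ""
  else if ¬ PySem.Str.startswith uid "1000" then ""
  else
    -- uid[4], uid[5], uid[6]: in range under the n = 15 guard, so getD is exact
    let c4 := (PySem.Str.pyGet? uid 4).getD ' '
    let c5 := (PySem.Str.pyGet? uid 5).getD ' '
    let c6 := (PySem.Str.pyGet? uid 6).getD ' '
    if c4 ≠ '0' then
      if '1' ≤ c4 ∧ c4 ≤ '9' then pvY5.getD (c4.toNat - 49) "" else ""
    else if c5 ≠ '0' then
      if '1' ≤ c5 ∧ c5 ≤ '9' then pvY6.getD (c5.toNat - 49) "" else ""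
    else
      if '0' ≤ c6 ∧ c6 ≤ '9' then pvY7.getD (c6.toNat - 48) "" else ""

-- ===== PRECONDITION & SPEC =====
def Spec_joined (uid : String) (out : String) : Prop := out = joined_alt uid
instance (uid : String) (out : String) : Decidable (Spec_joined uid out) := by unfold Spec_joined; infer_instance

-- ===== CLAIM (what is proved, stated in full; the proofs are below) =====
def Claim_equal_joined : Prop := ∀ (uid : String), Dom_joined uid → Spec_joined uid (joined uid)

-- ===== LEMMAS AND PROOFS =====

theorem pv_char_toNat_le (c : Char) (lo : Char) (h : lo ≤ c) : lo.toNat ≤ c.toNat := by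
  rw [Char.le_def] at h; exact UInt32.le_iff_toNat_le.mp h

theorem pv_char_of_toNat (c : Char) (n : Nat) (h : c.toNat = n) : c = Char.ofNat n := by
  have := congrArg Char.ofNat h; rwa [Char.ofNat_toNat] at this

-- a char is one of the ten digits, or provably outside ['0','9']
theorem pv_digit_cases (c : Char) :
    c = '0' ∨ c = '1' ∨ c = '2' ∨ c = '3' ∨ c = '4' ∨ c = '5' ∨ c = '6' ∨ c = '7' ∨
    c = '8' ∨ c = '9' ∨ ¬ ('0' ≤ c ∧ c ≤ '9') := by
  by_cases hr : '0' ≤ c ∧ c ≤ '9'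
  · have h1 : 48 ≤ c.toNat := pv_char_toNat_le c '0' hr.1
    have h2 : c.toNat ≤ 57 := pv_char_toNat_le '9' c hr.2
    rcases (by omega : c.toNat = 48 ∨ c.toNat = 49 ∨ c.toNat = 50 ∨ c.toNat = 51 ∨
        c.toNat = 52 ∨ c.toNat = 53 ∨ c.toNat = 54 ∨ c.toNat = 55 ∨ c.toNat = 56 ∨
        c.toNat = 57) with h|h|h|h|h|h|h|h|h|h <;>
      (rw [pv_char_of_toNat c _ h]; decide)
  · exact .inr (.inr (.inr (.inr (.inr (.inr (.inr (.inr (.inr (.inr hr)))))))))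

-- the length-≠-15 tail: A's if-chain = B's dict lookup with default
theorem pv_tail (m : Int) (h : m ≠ 15) :
    (if m = 9 ∨ m = 10 then "2008/2009"
     else if m = 8 then "2007/2008"
     else if m = 7 then "2006/2007"
     else "") = pvTail.getD m "" := by
  by_cases h9 : m = 9; · subst h9; decide
  by_cases h10 : m = 10; · subst h10; decide
  by_cases h8 : m = 8; · subst h8; decide
  by_cases h7 : m = 7; · subst h7; decide
  have e9 : ((9:Int) == m) = false := beq_eq_false_iff_ne.mpr (Ne.symm h9)
  have e10 : ((10:Int) == m) = false := beq_eq_false_iff_ne.mpr (Ne.symm h10)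
  have e8 : ((8:Int) == m) = false := beq_eq_false_iff_ne.mpr (Ne.symm h8)
  have e7 : ((7:Int) == m) = false := beq_eq_false_iff_ne.mpr (Ne.symm h7)
  simp [pvTail, PySem.Dict.getD, PySem.Dict.get?, List.find?, e9, e10, e8, e7, h9, h10, h8, h7]

-- the char-level core: A's 28-entry scan = B's decision tree on positions 4/5/6
theorem pv_core (c0 c1 c2 c3 c4 c5 c6 : Char) (rest : List Char) :
    (match pvPrefixTable.find? (fun pr => PySem.Chars.startswith (c0::c1::c2::c3::c4::c5::c6::rest) pr.1.toList) with
     | some pr => pr.2 | none => "") =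
    (if ¬ PySem.Chars.startswith (c0::c1::c2::c3::c4::c5::c6::rest) ("1000").toList then ""
     else if c4 ≠ '0' then (if '1' ≤ c4 ∧ c4 ≤ '9' then pvY5.getD (c4.toNat - 49) "" else "")
     else if c5 ≠ '0' then (if '1' ≤ c5 ∧ c5 ≤ '9' then pvY6.getD (c5.toNat - 49) "" else "")
     else (if '0' ≤ c6 ∧ c6 ≤ '9' then pvY7.getD (c6.toNat - 48) "" else "")) := by
  by_cases h0 : c0 = '1'
  case neg =>
    have e : (('1' : Char) == c0) = false := beq_eq_false_iff_ne.mpr (Ne.symm h0)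
    simp [pvPrefixTable, List.find?, PySem.Chars.startswith, List.isPrefixOf, e]
  subst h0
  by_cases h1 : c1 = '0'
  case neg =>
    have e : (('0' : Char) == c1) = false := beq_eq_false_iff_ne.mpr (Ne.symm h1)
    simp [pvPrefixTable, List.find?, PySem.Chars.startswith, List.isPrefixOf, e]
  subst h1
  by_cases h2 : c2 = '0'
  case neg =>
    have e : (('0' : Char) == c2) = false := beq_eq_false_iff_ne.mpr (Ne.symm h2)
    simp [pvPrefixTable, List.find?, PySem.Chars.startswith, List.isPrefixOf, e]
  subst h2
  by_cases h3 : c3 = '0'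
  case neg =>
    have e : (('0' : Char) == c3) = false := beq_eq_false_iff_ne.mpr (Ne.symm h3)
    simp [pvPrefixTable, List.find?, PySem.Chars.startswith, List.isPrefixOf, e]
  subst h3
  rcases pv_digit_cases c4 with rfl|rfl|rfl|rfl|rfl|rfl|rfl|rfl|rfl|rfl|hr
  · -- c4 = '0': look at c5
    rcases pv_digit_cases c5 with rfl|rfl|rfl|rfl|rfl|rfl|rfl|rfl|rfl|rfl|hr
    · -- c5 = '0': look at c6
      rcases pv_digit_cases c6 with rfl|rfl|rfl|rfl|rfl|rfl|rfl|rfl|rfl|rfl|hr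
      · simp [pvPrefixTable, PySem.Chars.startswith, List.isPrefixOf, pvY7]
      · simp [pvPrefixTable, List.find?, PySem.Chars.startswith, List.isPrefixOf, pvY7]
      · simp [pvPrefixTable, List.find?, PySem.Chars.startswith, List.isPrefixOf, pvY7]
      · simp [pvPrefixTable, List.find?, PySem.Chars.startswith, List.isPrefixOf, pvY7]
      · simp [pvPrefixTable, List.find?, PySem.Chars.startswith, List.isPrefixOf, pvY7]
      · simp [pvPrefixTable, List.find?, PySem.Chars.startswith, List.isPrefixOf, pvY7]
      · simp [pvPrefixTable, List.find?, PySem.Chars.startswith, List.isPrefixOf, pvY7]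
      · simp [pvPrefixTable, List.find?, PySem.Chars.startswith, List.isPrefixOf, pvY7]
      · simp [pvPrefixTable, List.find?, PySem.Chars.startswith, List.isPrefixOf, pvY7]
      · simp [pvPrefixTable, List.find?, PySem.Chars.startswith, List.isPrefixOf, pvY7]
      · -- c6 outside the digit range: no table entry matches, B's range test fails
        have n0 : c6 ≠ '0' := fun h => hr (by subst h; exact ⟨by decide, by decide⟩)
        have e0 : (('0' : Char) == c6) = false := beq_eq_false_iff_ne.mpr (Ne.symm n0)
        have n1 : c6 ≠ '1' := fun h => hr (by subst h; exact ⟨by decide, by decide⟩)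
        have e1 : (('1' : Char) == c6) = false := beq_eq_false_iff_ne.mpr (Ne.symm n1)
        have n2 : c6 ≠ '2' := fun h => hr (by subst h; exact ⟨by decide, by decide⟩)
        have e2 : (('2' : Char) == c6) = false := beq_eq_false_iff_ne.mpr (Ne.symm n2)
        have n3 : c6 ≠ '3' := fun h => hr (by subst h; exact ⟨by decide, by decide⟩)
        have e3 : (('3' : Char) == c6) = false := beq_eq_false_iff_ne.mpr (Ne.symm n3)
        have n4 : c6 ≠ '4' := fun h => hr (by subst h; exact ⟨by decide, by decide⟩)
        have e4 : (('4' : Char) == c6) = false := beq_eq_false_iff_ne.mpr (Ne.symm n4)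
        have n5 : c6 ≠ '5' := fun h => hr (by subst h; exact ⟨by decide, by decide⟩)
        have e5 : (('5' : Char) == c6) = false := beq_eq_false_iff_ne.mpr (Ne.symm n5)
        have n6 : c6 ≠ '6' := fun h => hr (by subst h; exact ⟨by decide, by decide⟩)
        have e6 : (('6' : Char) == c6) = false := beq_eq_false_iff_ne.mpr (Ne.symm n6)
        have n7 : c6 ≠ '7' := fun h => hr (by subst h; exact ⟨by decide, by decide⟩)
        have e7 : (('7' : Char) == c6) = false := beq_eq_false_iff_ne.mpr (Ne.symm n7)
        have n8 : c6 ≠ '8' := fun h => hr (by subst h; exact ⟨by decide, by decide⟩)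
        have e8 : (('8' : Char) == c6) = false := beq_eq_false_iff_ne.mpr (Ne.symm n8)
        have n9 : c6 ≠ '9' := fun h => hr (by subst h; exact ⟨by decide, by decide⟩)
        have e9 : (('9' : Char) == c6) = false := beq_eq_false_iff_ne.mpr (Ne.symm n9)
        simp [pvPrefixTable, List.find?, PySem.Chars.startswith, List.isPrefixOf, e0, e1, e2, e3, e4, e5, e6, e7, e8, e9, hr]
    · simp [pvPrefixTable, List.find?, PySem.Chars.startswith, List.isPrefixOf, pvY6]
    · simp [pvPrefixTable, List.find?, PySem.Chars.startswith, List.isPrefixOf, pvY6]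
    · simp [pvPrefixTable, List.find?, PySem.Chars.startswith, List.isPrefixOf, pvY6]
    · simp [pvPrefixTable, List.find?, PySem.Chars.startswith, List.isPrefixOf, pvY6]
    · simp [pvPrefixTable, List.find?, PySem.Chars.startswith, List.isPrefixOf, pvY6]
    · simp [pvPrefixTable, List.find?, PySem.Chars.startswith, List.isPrefixOf, pvY6]
    · simp [pvPrefixTable, List.find?, PySem.Chars.startswith, List.isPrefixOf, pvY6]
    · simp [pvPrefixTable, List.find?, PySem.Chars.startswith, List.isPrefixOf, pvY6]
    · simp [pvPrefixTable, List.find?, PySem.Chars.startswith, List.isPrefixOf, pvY6]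
    · -- c5 outside the digit range: no table entry matches, B's range test fails
      have n0 : c5 ≠ '0' := fun h => hr (by subst h; exact ⟨by decide, by decide⟩)
      have e0 : (('0' : Char) == c5) = false := beq_eq_false_iff_ne.mpr (Ne.symm n0)
      have n1 : c5 ≠ '1' := fun h => hr (by subst h; exact ⟨by decide, by decide⟩)
      have e1 : (('1' : Char) == c5) = false := beq_eq_false_iff_ne.mpr (Ne.symm n1)
      have n2 : c5 ≠ '2' := fun h => hr (by subst h; exact ⟨by decide, by decide⟩)
      have e2 : (('2' : Char) == c5) = false := beq_eq_false_iff_ne.mpr (Ne.symm n2)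
      have n3 : c5 ≠ '3' := fun h => hr (by subst h; exact ⟨by decide, by decide⟩)
      have e3 : (('3' : Char) == c5) = false := beq_eq_false_iff_ne.mpr (Ne.symm n3)
      have n4 : c5 ≠ '4' := fun h => hr (by subst h; exact ⟨by decide, by decide⟩)
      have e4 : (('4' : Char) == c5) = false := beq_eq_false_iff_ne.mpr (Ne.symm n4)
      have n5 : c5 ≠ '5' := fun h => hr (by subst h; exact ⟨by decide, by decide⟩)
      have e5 : (('5' : Char) == c5) = false := beq_eq_false_iff_ne.mpr (Ne.symm n5)
      have n6 : c5 ≠ '6' := fun h => hr (by subst h; exact ⟨by decide, by decide⟩)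
      have e6 : (('6' : Char) == c5) = false := beq_eq_false_iff_ne.mpr (Ne.symm n6)
      have n7 : c5 ≠ '7' := fun h => hr (by subst h; exact ⟨by decide, by decide⟩)
      have e7 : (('7' : Char) == c5) = false := beq_eq_false_iff_ne.mpr (Ne.symm n7)
      have n8 : c5 ≠ '8' := fun h => hr (by subst h; exact ⟨by decide, by decide⟩)
      have e8 : (('8' : Char) == c5) = false := beq_eq_false_iff_ne.mpr (Ne.symm n8)
      have n9 : c5 ≠ '9' := fun h => hr (by subst h; exact ⟨by decide, by decide⟩)
      have e9 : (('9' : Char) == c5) = false := beq_eq_false_iff_ne.mpr (Ne.symm n9)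
      have nrr : ¬ ('1' ≤ c5 ∧ c5 ≤ '9') := fun h => hr ⟨le_trans (by decide) h.1, h.2⟩
      simp [pvPrefixTable, List.find?, PySem.Chars.startswith, List.isPrefixOf, e0, e1, e2, e3, e4, e5, e6, e7, e8, e9, n0, nrr]
  · simp [pvPrefixTable, List.find?, PySem.Chars.startswith, List.isPrefixOf, pvY5]
  · simp [pvPrefixTable, List.find?, PySem.Chars.startswith, List.isPrefixOf, pvY5]
  · simp [pvPrefixTable, List.find?, PySem.Chars.startswith, List.isPrefixOf, pvY5]
  · simp [pvPrefixTable, List.find?, PySem.Chars.startswith, List.isPrefixOf, pvY5]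
  · simp [pvPrefixTable, List.find?, PySem.Chars.startswith, List.isPrefixOf, pvY5]
  · simp [pvPrefixTable, List.find?, PySem.Chars.startswith, List.isPrefixOf, pvY5]
  · simp [pvPrefixTable, List.find?, PySem.Chars.startswith, List.isPrefixOf, pvY5]
  · simp [pvPrefixTable, List.find?, PySem.Chars.startswith, List.isPrefixOf, pvY5]
  · simp [pvPrefixTable, List.find?, PySem.Chars.startswith, List.isPrefixOf, pvY5]
  · -- c4 outside the digit range: no table entry matches, B's range test fails
    have n0 : c4 ≠ '0' := fun h => hr (by subst h; exact ⟨by decide, by decide⟩)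
    have e0 : (('0' : Char) == c4) = false := beq_eq_false_iff_ne.mpr (Ne.symm n0)
    have n1 : c4 ≠ '1' := fun h => hr (by subst h; exact ⟨by decide, by decide⟩)
    have e1 : (('1' : Char) == c4) = false := beq_eq_false_iff_ne.mpr (Ne.symm n1)
    have n2 : c4 ≠ '2' := fun h => hr (by subst h; exact ⟨by decide, by decide⟩)
    have e2 : (('2' : Char) == c4) = false := beq_eq_false_iff_ne.mpr (Ne.symm n2)
    have n3 : c4 ≠ '3' := fun h => hr (by subst h; exact ⟨by decide, by decide⟩)
    have e3 : (('3' : Char) == c4) = false := beq_eq_false_iff_ne.mpr (Ne.symm n3)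
    have n4 : c4 ≠ '4' := fun h => hr (by subst h; exact ⟨by decide, by decide⟩)
    have e4 : (('4' : Char) == c4) = false := beq_eq_false_iff_ne.mpr (Ne.symm n4)
    have n5 : c4 ≠ '5' := fun h => hr (by subst h; exact ⟨by decide, by decide⟩)
    have e5 : (('5' : Char) == c4) = false := beq_eq_false_iff_ne.mpr (Ne.symm n5)
    have n6 : c4 ≠ '6' := fun h => hr (by subst h; exact ⟨by decide, by decide⟩)
    have e6 : (('6' : Char) == c4) = false := beq_eq_false_iff_ne.mpr (Ne.symm n6)
    have n7 : c4 ≠ '7' := fun h => hr (by subst h; exact ⟨by decide, by decide⟩)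
    have e7 : (('7' : Char) == c4) = false := beq_eq_false_iff_ne.mpr (Ne.symm n7)
    have n8 : c4 ≠ '8' := fun h => hr (by subst h; exact ⟨by decide, by decide⟩)
    have e8 : (('8' : Char) == c4) = false := beq_eq_false_iff_ne.mpr (Ne.symm n8)
    have n9 : c4 ≠ '9' := fun h => hr (by subst h; exact ⟨by decide, by decide⟩)
    have e9 : (('9' : Char) == c4) = false := beq_eq_false_iff_ne.mpr (Ne.symm n9)
    have nrr : ¬ ('1' ≤ c4 ∧ c4 ≤ '9') := fun h => hr ⟨le_trans (by decide) h.1, h.2⟩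
    simp [pvPrefixTable, List.find?, PySem.Chars.startswith, List.isPrefixOf, e0, e1, e2, e3, e4, e5, e6, e7, e8, e9, n0, nrr]

-- uid[i] under a known cons decomposition of uid.toList
theorem pv_get_eq (uid : String) (i : Nat) (c : Char) (cs : List Char)
    (h : uid.toList = cs) (hi : i < cs.length) (hc : cs[i] = c) :
    (PySem.Str.pyGet? uid (i : Int)).getD ' ' = c := by
  rw [PySem.Str.pyGet?_eq, PySem.Chars.pyGet?_eq_listPyGet?, h, PySem.List.pyGet?_natCast]
  simp [hc, hi]

theorem pv_joined_eq (uid : String) : joined uid = joined_alt uid := by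
  unfold joined joined_alt
  simp only [PySem.Str.len_eq]
  by_cases h15 : uid.toList.length = 15
  case neg =>
    have h15' : ¬ ((uid.toList.length : Int) = 15) := by exact_mod_cast h15
    rw [if_neg h15', if_pos h15']
    exact pv_tail _ h15'
  case pos =>
    obtain ⟨c0,c1,c2,c3,c4,c5,c6,rest,hl⟩ :
        ∃ c0 c1 c2 c3 c4 c5 c6 rest, uid.toList = c0::c1::c2::c3::c4::c5::c6::rest := by
      rcases huid : uid.toList with _|⟨a0,_|⟨a1,_|⟨a2,_|⟨a3,_|⟨a4,_|⟨a5,_|⟨a6,r⟩⟩⟩⟩⟩⟩⟩ <;>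
        first
          | exact ⟨_,_,_,_,_,_,_,_, rfl⟩
          | (exfalso; rw [huid] at h15; simp at h15)
    have h15' : ((uid.toList.length : Int) = 15) := by exact_mod_cast h15
    rw [if_pos h15', if_neg (not_not_intro h15')]
    have g4 := pv_get_eq uid 4 c4 _ hl (by simp) (by simp)
    have g5 := pv_get_eq uid 5 c5 _ hl (by simp) (by simp)
    have g6 := pv_get_eq uid 6 c6 _ hl (by simp) (by simp)
    simp only [show ((4:Nat):Int) = (4:Int) by norm_num] at g4
    simp only [show ((5:Nat):Int) = (5:Int) by norm_num] at g5
    simp only [show ((6:Nat):Int) = (6:Int) by norm_num] at g6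
    simp only [PySem.Str.startswith_eq, hl, g4, g5, g6]
    exact pv_core c0 c1 c2 c3 c4 c5 c6 rest

-- ===== VERDICT (by name: the statement is the Claim_ definition above) =====
theorem joined_spec : Claim_equal_joined := by
  intro uid _
  exact pv_joined_eq uid
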